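-- pv_equiv track=rewrite | github.com/jccriado/matchingtools | matchingtools/rules.py | _map_tensor_indices
-- ===== SOURCE A (Python) =====
-- def _map_tensor_indices(I, J):
--     mapping = {}
--
--     for i, j in zip(I, J):
--         if i in mapping and mapping[i] != j:
--             # unable to match the indices: incoherence reached
--             return None
--         else:
--             # unknown index yet. try with the obvious mapping and
--             # wait for an incoherence later on.
--             mapping[i] = j
--
--     return mapping
-- ===== SOURCE B (Python) =====
-- def _map_tensor_indices(I, J):
--     # group-then-validate: first collect, per index i, the distinct j's paired
--     # with it (first-occurrence order), then check every group is a singleton.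
--     groups = {}
--     for i, j in zip(I, J):
--         groups[i] = groups.get(i, [])
--         if j not in groups[i]:
--             groups[i] = groups[i] + [j]
--     result = {}
--     for i, vals in groups.items():
--         if len(vals) != 1:
--             return None
--         result[i] = vals[0]
--     return result
-- ===== Notes on version B (the rewrite author's own statement) =====
-- stated objective: alternative
-- what changed: A interleaves conflict detection with dict construction in one pass; B first groups each i with the list of distinct j's paired with it and then validates in a second pass that every group is a singleton, building the result dict from the groups.
import Mathlib
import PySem

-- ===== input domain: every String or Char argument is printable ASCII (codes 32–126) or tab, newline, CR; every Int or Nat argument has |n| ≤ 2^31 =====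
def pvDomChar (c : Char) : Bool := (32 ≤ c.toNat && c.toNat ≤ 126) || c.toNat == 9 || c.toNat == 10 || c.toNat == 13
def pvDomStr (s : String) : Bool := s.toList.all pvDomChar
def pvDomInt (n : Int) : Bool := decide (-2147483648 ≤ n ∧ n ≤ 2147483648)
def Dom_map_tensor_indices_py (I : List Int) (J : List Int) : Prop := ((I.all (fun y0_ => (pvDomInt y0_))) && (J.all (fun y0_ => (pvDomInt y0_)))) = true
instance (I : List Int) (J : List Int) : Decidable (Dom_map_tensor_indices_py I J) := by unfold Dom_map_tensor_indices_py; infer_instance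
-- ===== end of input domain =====

-- B replaces A's interleaved check-and-insert single pass by a group-then-validate
-- two-pass shape (same O(n) cost, different decomposition).

-- ===== PORT A =====
-- the 'for i, j in zip(I, J)' loop of A, early return None on incoherence
def goA : List (Int × Int) → PySem.Dict Int Int → Option (PySem.Dict Int Int)
  | [], m => some m
  | (i, j) :: rest, m =>
    match m.get? i with                      -- 'i in mapping and mapping[i] != j'
    | some j' => if j' ≠ j then none else goA rest (m.insert i j)
    | none => goA rest (m.insert i j)

def map_tensor_indices_py (I : List Int) (J : List Int) : Option (List (Int × Int)) :=
  (goA (I.zip J) PySem.Dict.empty).map PySem.Dict.items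

-- ===== PORT B =====
-- first loop of B: 'groups[i] = groups.get(i, []); if j not in groups[i]: groups[i] = groups[i] + [j]'
def stepB (g : PySem.Dict Int (List Int)) (p : Int × Int) : PySem.Dict Int (List Int) :=
  let g1 := g.insert p.1 (g.getD p.1 [])
  if p.2 ∈ g1.getD p.1 [] then g1 else g1.insert p.1 (g1.getD p.1 [] ++ [p.2])

-- second loop of B: validate each group is a singleton, building the result dict
def goB : List (Int × List Int) → PySem.Dict Int Int → Option (PySem.Dict Int Int)
  | [], res => some res
  | (i, vals) :: rest, res =>
    if vals.length ≠ 1 then none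
    else goB rest (res.insert i vals.headI)   -- vals[0]; vals ≠ [] since its length is 1

def map_tensor_indices_py_alt (I : List Int) (J : List Int) : Option (List (Int × Int)) :=
  (goB ((I.zip J).foldl stepB PySem.Dict.empty).items PySem.Dict.empty).map PySem.Dict.items

-- ===== PRECONDITION & SPEC =====
def Spec_map_tensor_indices_py (I : List Int) (J : List Int) (out : Option (List (Int × Int))) : Prop := out = map_tensor_indices_py_alt I J
instance (I : List Int) (J : List Int) (out : Option (List (Int × Int))) : Decidable (Spec_map_tensor_indices_py I J out) := by unfold Spec_map_tensor_indices_py; infer_instance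

-- ===== CLAIM (what is proved, stated in full; the proofs are below) =====
def Claim_equal_map_tensor_indices_py : Prop := ∀ (I : List Int) (J : List Int), Dom_map_tensor_indices_py I J → Spec_map_tensor_indices_py I J (map_tensor_indices_py I J)

-- ===== LEMMAS AND PROOFS =====

-- the grouping step is an insert of the updated group list
def updB (vals : List Int) (j : Int) : List Int := if j ∈ vals then vals else vals ++ [j]

def stepIns (g : PySem.Dict Int (List Int)) (p : Int × Int) : PySem.Dict Int (List Int) :=
  g.insert p.1 (updB (g.getD p.1 []) p.2)

theorem stepB_eq : stepB = stepIns := by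
  funext g p
  simp only [stepB, stepIns, updB, PySem.Dict.getD_insert_self, PySem.Dict.insert_insert_self]
  split <;> rfl

-- A's mapping, viewed as a dict of singleton group lists
def lift1 (p : Int × Int) : Int × List Int := (p.1, [p.2])

def liftD (m : PySem.Dict Int Int) : PySem.Dict Int (List Int) := PySem.Dict.mk (m.items.map lift1)

theorem keys_liftD (m : PySem.Dict Int Int) : (liftD m).keys = m.keys := by
  simp [liftD, PySem.Dict.keys, lift1]

theorem get?_mk_map_lift1 (ps : List (Int × Int)) (k : Int) :
    (PySem.Dict.mk (ps.map lift1) : PySem.Dict Int (List Int)).get? k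
      = ((PySem.Dict.mk ps : PySem.Dict Int Int).get? k).map (fun v => [v]) := by
  induction ps with
  | nil => rfl
  | cons q rest ih =>
      obtain ⟨a, b⟩ := q
      rw [List.map_cons, show lift1 (a, b) = (a, [b]) from rfl,
          PySem.Dict.get?_mk_cons, PySem.Dict.get?_mk_cons]
      by_cases h : (a == k) = true
      · simp [h]
      · simp [h, ih]

theorem get?_liftD (m : PySem.Dict Int Int) (k : Int) :
    (liftD m).get? k = (m.get? k).map (fun v => [v]) := by
  cases m with
  | mk items => exact get?_mk_map_lift1 items k

theorem liftD_insert (m : PySem.Dict Int Int) (i j : Int) :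
    liftD (m.insert i j) = (liftD m).insert i [j] := by
  apply PySem.Dict.ext
  have hc : (liftD m).contains i = m.contains i := by
    rw [PySem.Dict.contains_eq_decide_mem_keys, PySem.Dict.contains_eq_decide_mem_keys, keys_liftD]
  by_cases h : m.contains i = true
  · rw [show ((liftD m).insert i [j]).items = _ from
        PySem.Dict.items_insert_of_contains _ _ (hc ▸ h)]
    rw [show (liftD (m.insert i j)).items = (m.insert i j).items.map lift1 from rfl,
        PySem.Dict.items_insert_of_contains _ _ h]
    rw [show (liftD m).items = m.items.map lift1 from rfl, List.map_map, List.map_map]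
    apply List.map_congr_left
    intro p _
    by_cases hp : p.1 = i <;> simp [lift1, hp]
  · have h' : m.contains i = false := by simpa using h
    rw [show ((liftD m).insert i [j]).items = _ from
        PySem.Dict.items_insert_of_not_contains _ _ (hc ▸ h')]
    rw [show (liftD (m.insert i j)).items = (m.insert i j).items.map lift1 from rfl,
        PySem.Dict.items_insert_of_not_contains _ _ h']
    simp [liftD, lift1]

theorem liftD_empty : liftD PySem.Dict.empty = PySem.Dict.empty := rfl

-- validating a dict of singleton groups rebuilds it, key by key
theorem goB_lift (ps : List (Int × Int)) (res : PySem.Dict Int Int) :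
    goB (ps.map lift1) res = some (ps.foldl (fun r p => r.insert p.1 p.2) res) := by
  induction ps generalizing res with
  | nil => rfl
  | cons q rest ih => simp [goB, lift1, ih]

-- group lists only grow along the grouping fold
theorem mono_stepIns (l : List (Int × Int)) (g : PySem.Dict Int (List Int)) (k : Int) :
    ∃ ys, (l.foldl stepIns g).getD k [] = g.getD k [] ++ ys := by
  induction l generalizing g with
  | nil => exact ⟨[], by simp⟩
  | cons p rest ih =>
      obtain ⟨a, b⟩ := p
      obtain ⟨ys, hys⟩ := ih (stepIns g (a, b))
      rw [List.foldl_cons]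
      by_cases hk : k = a
      · subst hk
        by_cases hmem : b ∈ g.getD k []
        · refine ⟨ys, ?_⟩
          rw [hys]; simp [stepIns, updB, hmem]
        · refine ⟨b :: ys, ?_⟩
          rw [hys]; simp [stepIns, updB, hmem]
      · refine ⟨ys, ?_⟩
        rw [hys]
        simp only [stepIns, PySem.Dict.getD_insert, if_neg hk]

-- validation fails as soon as one group is not a singleton
theorem goB_fail (ps : List (Int × List Int)) (res : PySem.Dict Int Int)
    (p : Int × List Int) (hp : p ∈ ps) (hlen : p.2.length ≠ 1) : goB ps res = none := by
  induction ps generalizing res with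
  | nil => cases hp
  | cons q rest ih =>
      rcases List.mem_cons.mp hp with hq | hq
      · subst hq
        obtain ⟨a, b⟩ := p
        simp only [goB]; rw [if_pos hlen]
      · by_cases hl : q.2.length ≠ 1
        · obtain ⟨a, b⟩ := q; simp only [goB]; rw [if_pos hl]
        · obtain ⟨a, b⟩ := q
          simp only [goB]; rw [if_neg hl]
          exact ih _ hq

-- main invariant: A's loop from mapping m equals B's validation of the groups grown from (liftD m)
theorem mainL (l : List (Int × Int)) (m : PySem.Dict Int Int) (hnd : m.keys.Nodup) :
    (goA l m).map PySem.Dict.items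
      = (goB ((l.foldl stepB (liftD m)).items) PySem.Dict.empty).map PySem.Dict.items := by
  rw [stepB_eq]
  induction l generalizing m with
  | nil =>
      rw [List.foldl_nil, show (liftD m).items = m.items.map lift1 from rfl, goB_lift]
      have hfresh : ∀ a ∈ m.items, (PySem.Dict.empty : PySem.Dict Int Int).contains a.1 = false := by
        intro a _; exact PySem.Dict.contains_empty a.1
      have := PySem.Dict.items_foldl_insert_fresh (d := PySem.Dict.empty)
        (l := m.items) (k := fun a => a.1) (v := fun a => a.2) hfresh (by simpa using hnd)
      simp only [goA, Option.map_some]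
      congr 1
      rw [this]
      simp
      rfl
  | cons p rest ih =>
      obtain ⟨i, j⟩ := p
      rw [List.foldl_cons]
      cases hm : m.get? i with
      | none =>
          have hlift : stepIns (liftD m) (i, j) = liftD (m.insert i j) := by
            rw [liftD_insert, stepIns]
            have : (liftD m).getD i [] = [] := by
              rw [PySem.Dict.getD_eq_get?_getD, get?_liftD, hm]; rfl
            simp [this, updB]
          rw [hlift, show goA ((i, j) :: rest) m = goA rest (m.insert i j) by simp [goA, hm]]
          exact ih (m.insert i j) (PySem.Dict.nodup_keys_insert m i j hnd)
      | some j' =>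
          have hgetD : (liftD m).getD i [] = [j'] := by
            rw [PySem.Dict.getD_eq_get?_getD, get?_liftD, hm]; rfl
          by_cases hj : j' = j
          · subst hj
            have hlift : stepIns (liftD m) (i, j') = liftD (m.insert i j') := by
              rw [liftD_insert, stepIns]; simp [hgetD, updB]
            rw [hlift, show goA ((i, j') :: rest) m = goA rest (m.insert i j') by simp [goA, hm]]
            exact ih (m.insert i j') (PySem.Dict.nodup_keys_insert m i j' hnd)
          · rw [show goA ((i, j) :: rest) m = none by simp [goA, hm, hj]]
            -- B's final group at key i has ≥ 2 entries, so validation returns none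
            have hstep : stepIns (liftD m) (i, j) = (liftD m).insert i [j', j] := by
              rw [stepIns, hgetD]; simp [updB, Ne.symm hj]
            obtain ⟨ys, hys⟩ := mono_stepIns rest ((liftD m).insert i [j', j]) i
            rw [PySem.Dict.getD_insert_self] at hys
            set G := rest.foldl stepIns ((liftD m).insert i [j', j]) with hG
            have hget : G.get? i = some ([j', j] ++ ys) := by
              cases hg : G.get? i with
              | none =>
                  exfalso
                  have := PySem.Dict.getD_of_get?_eq_none (d := G) (k := i) (d0 := ([] : List Int)) hg
                  rw [hys] at this; simp at this
              | some v =>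
                  have := PySem.Dict.getD_of_get?_eq_some (d := G) (k := i) (d0 := ([] : List Int)) hg
                  rw [hys] at this
                  exact congrArg some this.symm
            have hmem : (i, [j', j] ++ ys) ∈ G.items :=
              PySem.Dict.mem_items_of_get?_eq_some _ hget
            rw [hstep, ← hG,
                goB_fail G.items PySem.Dict.empty (i, [j', j] ++ ys) hmem (by simp)]

-- ===== VERDICT (by name: the statement is the Claim_ definition above) =====
theorem map_tensor_indices_py_spec : Claim_equal_map_tensor_indices_py := by
  intro I J _
  unfold Spec_map_tensor_indices_py map_tensor_indices_py map_tensor_indices_py_alt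
  rw [← liftD_empty]
  exact mainL (I.zip J) PySem.Dict.empty PySem.Dict.nodup_keys_empty
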